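-- pv_equiv track=rewrite | github.com/gskishan/Suntek | suntek_app/patches/import_customer_and_plant_data.py | format_customer_name
-- ===== SOURCE A (Python) =====
-- def format_customer_name(first_name, last_name):
--     if not first_name and not last_name:
--         return ""
--
--     def capitalize_name(name):
--         if not name:
--             return ""
--         words = name.strip().split()
--         return " ".join(word[0].upper() + word[1:].lower() for word in words)
--
--     first = capitalize_name(first_name)
--     last = capitalize_name(last_name)
--
--     return f"{first} {last}".strip()
-- ===== SOURCE B (Python) =====
-- def format_customer_name(first_name, last_name):
--     out = []
--     start = True
--     for ch in first_name + " " + last_name: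
--         if ch.isspace():
--             start = True
--         elif start:
--             if out:
--                 out.append(" ")
--             out.append(ch.upper())
--             start = False
--         else:
--             out.append(ch.lower())
--     return "".join(out)
-- ===== Notes on version B (the rewrite author's own statement) =====
-- stated objective: alternative
-- what changed: Replaces the strip/split/capitalize-per-word/join/strip pipeline with a single character-level state machine over first_name + " " + last_name: one streaming pass with a start-of-word flag that skips whitespace runs, inserts one separating space, uppercases the first letter of each word and lowercases the rest, with no intermediate word lists or per-name strings.
import Mathlib
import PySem

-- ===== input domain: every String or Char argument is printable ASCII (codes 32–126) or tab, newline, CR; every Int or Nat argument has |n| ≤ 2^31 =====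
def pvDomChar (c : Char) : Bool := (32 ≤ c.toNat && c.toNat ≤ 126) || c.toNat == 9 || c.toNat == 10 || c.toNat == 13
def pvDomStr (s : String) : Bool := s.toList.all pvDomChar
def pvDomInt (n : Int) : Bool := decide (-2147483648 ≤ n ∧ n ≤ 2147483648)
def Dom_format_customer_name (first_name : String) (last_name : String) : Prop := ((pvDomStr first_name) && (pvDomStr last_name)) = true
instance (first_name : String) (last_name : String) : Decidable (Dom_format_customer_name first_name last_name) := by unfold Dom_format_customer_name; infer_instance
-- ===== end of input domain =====

-- B replaces A's strip/split/capitalize/join/strip pipeline by a single character-level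
-- state machine over first_name ++ " " ++ last_name (alternative algorithm, same cost).


-- ===== PORT A =====
-- A's expression `word[0].upper() + word[1:].lower()`; the `none` arm is unreachable
-- (split() only yields non-empty words, so `word[0]` never raises)
def pvCapWord (w : List Char) : List Char :=
  match PySem.List.pyGet? w 0 with
  | some c => PySem.Chars.upper [c] ++ PySem.Chars.lower (PySem.List.slice w (some 1) none)
  | none => []

def pvCapitalizeName (name : String) : List Char :=
  if name = "" then []
  else PySem.Chars.join [' '] ((PySem.Chars.split₀ (PySem.Chars.strip name.toList)).map pvCapWord)

def format_customer_name (first_name : String) (last_name : String) : String :=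
  if first_name = "" ∧ last_name = "" then ""
  else
    let first := pvCapitalizeName first_name
    let last := pvCapitalizeName last_name
    String.ofList (PySem.Chars.strip (first ++ [' '] ++ last))

-- ===== PORT B =====
-- one pass over the characters of first_name + " " + last_name with a start-of-word flag
def pvRunB : List Char → List Char → Bool → List Char
  | [], out, _ => out
  | c :: rest, out, start =>
    if PySem.Chars.isspace c then pvRunB rest out true
    else if start then
      pvRunB rest ((if out.isEmpty then out else out ++ [' ']) ++ PySem.Chars.upper [c]) false
    else pvRunB rest (out ++ PySem.Chars.lower [c]) false

def format_customer_name_alt (first_name : String) (last_name : String) : String :=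
  String.ofList (pvRunB (first_name.toList ++ [' '] ++ last_name.toList) [] true)

-- ===== PRECONDITION & SPEC =====
def Spec_format_customer_name (first_name : String) (last_name : String) (out : String) : Prop := out = format_customer_name_alt first_name last_name
instance (first_name : String) (last_name : String) (out : String) : Decidable (Spec_format_customer_name first_name last_name out) := by unfold Spec_format_customer_name; infer_instance

-- ===== CLAIM (what is proved, stated in full; the proofs are below) =====
def Claim_equal_format_customer_name : Prop := ∀ (first_name : String) (last_name : String), Dom_format_customer_name first_name last_name → Spec_format_customer_name first_name last_name (format_customer_name first_name last_name)

-- ===== LEMMAS AND PROOFS =====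

-- a word is "good" if it is non-empty and contains no whitespace
def pvGood (w : List Char) : Prop := w ≠ [] ∧ ∀ c ∈ w, PySem.Chars.isspace c = false

-- split₀.go on an all-space remainder just finishes
theorem pv_go_spaces (u : List Char) (hu : ∀ c ∈ u, PySem.Chars.isspace c = true) :
    ∀ cur acc, PySem.Chars.split₀.go u cur acc = PySem.Chars.split₀.go [] cur acc := by
  induction u with
  | nil => intro cur acc; rfl
  | cons c u ih =>
    intro cur acc
    have hc : PySem.Chars.isspace c = true := hu c (by simp)
    have hu' : ∀ d ∈ u, PySem.Chars.isspace d = true := fun d hd => hu d (by simp [hd])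
    by_cases hcur : cur = []
    · subst hcur
      simp [PySem.Chars.split₀.go, hc, ih hu']
    · simp [PySem.Chars.split₀.go, hc, List.isEmpty_iff, hcur, ih hu', PySem.Chars.split₀.go]

-- trailing whitespace does not affect split₀.go
theorem pv_go_append_spaces (u : List Char) (hu : ∀ c ∈ u, PySem.Chars.isspace c = true) :
    ∀ s cur acc, PySem.Chars.split₀.go (s ++ u) cur acc = PySem.Chars.split₀.go s cur acc := by
  intro s
  induction s with
  | nil =>
    intro cur acc
    rw [List.nil_append, pv_go_spaces u hu]
  | cons c s ih =>
    intro cur acc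
    by_cases hc : PySem.Chars.isspace c = true
    · by_cases hcur : cur = []
      · subst hcur; simp [PySem.Chars.split₀.go, hc, ih]
      · simp [PySem.Chars.split₀.go, hc, List.isEmpty_iff, hcur, ih]
    · simp [PySem.Chars.split₀.go, hc, ih]

-- leading whitespace does not affect split₀.go with empty current word
theorem pv_go_dropWhile (s : List Char) :
    ∀ acc, PySem.Chars.split₀.go (List.dropWhile PySem.Chars.isspace s) [] acc
      = PySem.Chars.split₀.go s [] acc := by
  induction s with
  | nil => intro acc; rfl
  | cons c s ih =>
    intro acc
    by_cases hc : PySem.Chars.isspace c = true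
    · simp [List.dropWhile, hc, PySem.Chars.split₀.go, ih]
    · simp [List.dropWhile, hc]

theorem pv_split₀_strip (s : List Char) :
    PySem.Chars.split₀ (PySem.Chars.strip s) = PySem.Chars.split₀ s := by
  unfold PySem.Chars.split₀ PySem.Chars.strip
  set t := PySem.Chars.lstrip s with ht
  have h1 : PySem.Chars.split₀.go t [] [] = PySem.Chars.split₀.go s [] [] := by
    rw [ht]; unfold PySem.Chars.lstrip; exact pv_go_dropWhile s []
  have hdec : t = PySem.Chars.rstrip t ++ (List.takeWhile PySem.Chars.isspace t.reverse).reverse := by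
    unfold PySem.Chars.rstrip
    conv_lhs => rw [← List.reverse_reverse t,
      ← List.takeWhile_append_dropWhile (p := PySem.Chars.isspace) (l := t.reverse),
      List.reverse_append]
  have hsp : ∀ c ∈ (List.takeWhile PySem.Chars.isspace t.reverse).reverse,
      PySem.Chars.isspace c = true := by
    intro c hc
    rw [List.mem_reverse] at hc
    exact List.mem_takeWhile_imp hc
  calc PySem.Chars.split₀.go (PySem.Chars.rstrip t) [] []
      = PySem.Chars.split₀.go (PySem.Chars.rstrip t
          ++ (List.takeWhile PySem.Chars.isspace t.reverse).reverse) [] [] := by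
        rw [pv_go_append_spaces _ hsp]
    _ = PySem.Chars.split₀.go t [] [] := by rw [← hdec]
    _ = PySem.Chars.split₀.go s [] [] := h1

-- every word produced by split₀.go is non-empty and whitespace-free
theorem pv_go_good (s : List Char) :
    ∀ cur acc, (∀ c ∈ cur, PySem.Chars.isspace c = false) → (∀ w ∈ acc, pvGood w) →
      ∀ w ∈ PySem.Chars.split₀.go s cur acc, pvGood w := by
  induction s with
  | nil =>
    intro cur acc hcur hacc w hw
    by_cases hc : cur = []
    · subst hc; simp [PySem.Chars.split₀.go] at hw
      exact hacc w (by simpa using hw)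
    · simp [PySem.Chars.split₀.go, List.isEmpty_iff, hc] at hw
      rcases hw with hw | hw
      · exact hacc w hw
      · subst hw
        refine ⟨by simpa using hc, ?_⟩
        intro d hd; exact hcur d (by simpa using hd)
  | cons c s ih =>
    intro cur acc hcur hacc w hw
    by_cases hc : PySem.Chars.isspace c = true
    · by_cases hcr : cur = []
      · subst hcr
        simp only [PySem.Chars.split₀.go, hc, List.isEmpty_nil, if_true] at hw
        exact ih [] acc (by simp) hacc w hw
      · simp only [PySem.Chars.split₀.go, hc, if_true, List.isEmpty_iff, if_neg hcr] at hw
        refine ih [] _ (by simp) ?_ w hw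
        intro v hv
        rcases List.mem_cons.mp hv with hv | hv
        · subst hv
          refine ⟨by simpa using hcr, ?_⟩
          intro d hd; exact hcur d (by simpa using hd)
        · exact hacc v hv
    · simp only [PySem.Chars.split₀.go, hc, Bool.false_eq_true, if_false] at hw
      refine ih (c :: cur) acc ?_ hacc w hw
      intro d hd
      rcases List.mem_cons.mp hd with hd | hd
      · subst hd; simpa using hc
      · exact hcur d hd

theorem pv_split₀_good (s : List Char) : ∀ w ∈ PySem.Chars.split₀ s, pvGood w :=
  pv_go_good s [] [] (by simp) (by simp)

-- upper-/lower-casing keeps a character non-whitespace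
theorem pv_isspace_upperChar (c : Char) (h : PySem.Chars.isspace c = false) :
    PySem.Chars.isspace (PySem.Chars.upperChar c) = false := by
  unfold PySem.Chars.upperChar
  by_cases hl : PySem.Chars.islower c = true
  · have h1 : 97 ≤ c.toNat ∧ c.toNat ≤ 122 := by
      unfold PySem.Chars.islower at hl
      simp only [Bool.and_eq_true, decide_eq_true_eq] at hl
      exact ⟨hl.1, hl.2⟩
    have ht : (Char.ofNat (c.toNat - 32)).toNat = c.toNat - 32 := by
      unfold Char.ofNat
      rw [dif_pos (Or.inl (by omega : c.toNat - 32 < 55296))]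
      rfl
    simp only [hl, if_true]
    unfold PySem.Chars.isspace
    simp only [ht]
    simp only [Bool.or_eq_false_iff, Bool.and_eq_false_iff, decide_eq_false_iff_not]
    omega
  · simpa [hl] using h

theorem pv_isspace_lowerChar (c : Char) (h : PySem.Chars.isspace c = false) :
    PySem.Chars.isspace (PySem.Chars.lowerChar c) = false := by
  unfold PySem.Chars.lowerChar
  by_cases hu : PySem.Chars.isupper c = true
  · have h1 : 65 ≤ c.toNat ∧ c.toNat ≤ 90 := by
      unfold PySem.Chars.isupper at hu
      simp only [Bool.and_eq_true, decide_eq_true_eq] at hu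
      exact ⟨hu.1, hu.2⟩
    have ht : (Char.ofNat (c.toNat + 32)).toNat = c.toNat + 32 := by
      unfold Char.ofNat
      rw [dif_pos (Or.inl (by omega : c.toNat + 32 < 55296))]
      rfl
    simp only [hu, if_true]
    unfold PySem.Chars.isspace
    simp only [ht]
    simp only [Bool.or_eq_false_iff, Bool.and_eq_false_iff, decide_eq_false_iff_not]
    omega
  · simpa [hu] using h

theorem pv_capWord_good (w : List Char) (hw : pvGood w) : pvGood (pvCapWord w) := by
  obtain ⟨hne, hns⟩ := hw
  obtain ⟨c, rest, rfl⟩ := List.exists_cons_of_ne_nil hne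
  have hget : PySem.List.pyGet? (c :: rest) (0 : Int) = some c := by
    simp [PySem.List.pyGet?, PySem.List.pyIdx?]
  have hslice : PySem.List.slice (c :: rest) (some 1) none = rest := by
    rw [PySem.List.slice_from _ (by norm_num)]; simp
  unfold pvCapWord
  rw [hget, hslice]
  constructor
  · simp [PySem.Chars.upper]
  · intro d hd
    simp only [PySem.Chars.upper, PySem.Chars.lower, List.map, List.mem_append,
      List.mem_singleton, List.mem_map] at hd
    rcases hd with hd | ⟨e, he, rfl⟩
    · rcases hd with rfl
      exact pv_isspace_upperChar c (hns c (by simp))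
    · exact pv_isspace_lowerChar e (hns e (by simp [he]))

-- strip-related helpers
theorem pv_lstrip_cons (c : Char) (t : List Char) (h : PySem.Chars.isspace c = false) :
    PySem.Chars.lstrip (c :: t) = c :: t := by
  simp [PySem.Chars.lstrip, List.dropWhile, h]

theorem pv_lstrip_space_cons (t : List Char) :
    PySem.Chars.lstrip (' ' :: t) = PySem.Chars.lstrip t := by
  have hsp : PySem.Chars.isspace ' ' = true := by decide
  simp [PySem.Chars.lstrip, List.dropWhile, hsp]

theorem pv_rstrip_append_last (t : List Char) (c : Char) (h : PySem.Chars.isspace c = false) :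
    PySem.Chars.rstrip (t ++ [c]) = t ++ [c] := by
  unfold PySem.Chars.rstrip
  rw [List.reverse_append]
  simp [h]

theorem pv_rstrip_append_space (x : List Char) :
    PySem.Chars.rstrip (x ++ [' ']) = PySem.Chars.rstrip x := by
  have hsp : PySem.Chars.isspace ' ' = true := by decide
  unfold PySem.Chars.rstrip
  rw [List.reverse_append]
  simp [hsp]

-- joining good words: head and last characters are non-whitespace
theorem pv_join_head (W : List (List Char)) (hW : ∀ w ∈ W, pvGood w) (hne : W ≠ []) :
    ∃ c t, PySem.Chars.join [' '] W = c :: t ∧ PySem.Chars.isspace c = false := by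
  obtain ⟨w, W', rfl⟩ := List.exists_cons_of_ne_nil hne
  obtain ⟨hwne, hwns⟩ := hW w (by simp)
  obtain ⟨c, rest, rfl⟩ := List.exists_cons_of_ne_nil hwne
  cases W' with
  | nil =>
    exact ⟨c, rest, PySem.Chars.join_singleton _ _, hwns c (by simp)⟩
  | cons v W'' =>
    refine ⟨c, rest ++ ' ' :: PySem.Chars.join [' '] (v :: W''), ?_, hwns c (by simp)⟩
    rw [PySem.Chars.join_cons_cons]
    simp

theorem pv_join_last (W : List (List Char)) (hW : ∀ w ∈ W, pvGood w) (hne : W ≠ []) :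
    ∃ t c, PySem.Chars.join [' '] W = t ++ [c] ∧ PySem.Chars.isspace c = false := by
  induction W with
  | nil => exact absurd rfl hne
  | cons w W' ih =>
    obtain ⟨hwne, hwns⟩ := hW w (by simp)
    cases W' with
    | nil =>
      refine ⟨w.dropLast, w.getLast hwne, ?_, hwns _ (List.getLast_mem hwne)⟩
      rw [PySem.Chars.join_singleton]
      exact (List.dropLast_append_getLast hwne).symm
    | cons v W'' =>
      obtain ⟨t, c, hj, hc⟩ := ih (fun u hu => hW u (by simp [hu])) (by simp)
      refine ⟨w ++ ' ' :: t, c, ?_, hc⟩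
      rw [PySem.Chars.join_cons_cons, hj]
      simp

theorem pv_strip_join (W : List (List Char)) (hW : ∀ w ∈ W, pvGood w) :
    PySem.Chars.strip (PySem.Chars.join [' '] W) = PySem.Chars.join [' '] W := by
  by_cases hne : W = []
  · subst hne; rfl
  · obtain ⟨c, t, hj, hc⟩ := pv_join_head W hW hne
    obtain ⟨t2, c2, hj2, hc2⟩ := pv_join_last W hW hne
    unfold PySem.Chars.strip
    rw [hj, pv_lstrip_cons c t hc, ← hj, hj2, pv_rstrip_append_last t2 c2 hc2]

theorem pv_join_append (W1 W2 : List (List Char)) (h1 : W1 ≠ []) (h2 : W2 ≠ []) :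
    PySem.Chars.join [' '] (W1 ++ W2)
      = PySem.Chars.join [' '] W1 ++ ' ' :: PySem.Chars.join [' '] W2 := by
  induction W1 with
  | nil => exact absurd rfl h1
  | cons w W1' ih =>
    obtain ⟨v, W2', rfl⟩ := List.exists_cons_of_ne_nil h2
    cases W1' with
    | nil =>
      rw [List.singleton_append, PySem.Chars.join_cons_cons, PySem.Chars.join_singleton]
      simp
    | cons u W1'' =>
      simp only [List.cons_append] at ih ⊢
      rw [PySem.Chars.join_cons_cons, ih (by simp), PySem.Chars.join_cons_cons (sep := [' '])]
      simp

-- A's "cap(f) + ' ' + cap(l) then strip" equals the single join of all capped words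
theorem pv_strip_mid (W1 W2 : List (List Char))
    (hW1 : ∀ w ∈ W1, pvGood w) (hW2 : ∀ w ∈ W2, pvGood w) :
    PySem.Chars.strip (PySem.Chars.join [' '] W1 ++ ' ' :: PySem.Chars.join [' '] W2)
      = PySem.Chars.join [' '] (W1 ++ W2) := by
  by_cases h1 : W1 = []
  · subst h1
    have hjn : PySem.Chars.join [' '] ([] : List (List Char)) = [] := rfl
    rw [hjn, List.nil_append, List.nil_append]
    unfold PySem.Chars.strip
    rw [pv_lstrip_space_cons]
    have := pv_strip_join W2 hW2
    unfold PySem.Chars.strip at this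
    exact this
  · by_cases h2 : W2 = []
    · subst h2
      have hjn : PySem.Chars.join [' '] ([] : List (List Char)) = [] := rfl
      rw [hjn, List.append_nil]
      obtain ⟨c, t, hj, hc⟩ := pv_join_head W1 hW1 h1
      obtain ⟨t2, c2, hj2, hc2⟩ := pv_join_last W1 hW1 h1
      unfold PySem.Chars.strip
      have hcons : PySem.Chars.join [' '] W1 ++ [' '] = c :: (t ++ [' ']) := by
        rw [hj]; rfl
      rw [show (' ' :: ([] : List Char)) = [' '] from rfl, hcons,
        pv_lstrip_cons _ _ hc, ← hcons, pv_rstrip_append_space, hj2,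
        pv_rstrip_append_last t2 c2 hc2, ← hj2]
    · rw [← pv_join_append W1 W2 h1 h2]
      refine pv_strip_join _ ?_
      intro u hu
      rcases List.mem_append.mp hu with hu | hu
      · exact hW1 u hu
      · exact hW2 u hu

theorem pv_cap_name (s : String) :
    pvCapitalizeName s = PySem.Chars.join [' '] ((PySem.Chars.split₀ s.toList).map pvCapWord) := by
  unfold pvCapitalizeName
  by_cases h : s = ""
  · subst h; rfl
  · rw [if_neg h, pv_split₀_strip]

-- A's result in canonical form: the join of the capped words of both names
theorem pv_A_char (f l : String) :
    format_customer_name f l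
      = String.ofList (PySem.Chars.join [' ']
          ((PySem.Chars.split₀ f.toList ++ PySem.Chars.split₀ l.toList).map pvCapWord)) := by
  unfold format_customer_name
  dsimp only
  set W1 := (PySem.Chars.split₀ f.toList).map pvCapWord with hW1
  set W2 := (PySem.Chars.split₀ l.toList).map pvCapWord with hW2
  have hg1 : ∀ w ∈ W1, pvGood w := by
    intro w hw; rw [hW1] at hw
    obtain ⟨v, hv, rfl⟩ := List.mem_map.mp hw
    exact pv_capWord_good v (pv_split₀_good _ v hv)
  have hg2 : ∀ w ∈ W2, pvGood w := by
    intro w hw; rw [hW2] at hw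
    obtain ⟨v, hv, rfl⟩ := List.mem_map.mp hw
    exact pv_capWord_good v (pv_split₀_good _ v hv)
  by_cases hboth : f = "" ∧ l = ""
  · rw [if_pos hboth]
    obtain ⟨hf, hl⟩ := hboth
    subst hf; subst hl
    rfl
  · rw [if_neg hboth, pv_cap_name f, pv_cap_name l, ← hW1, ← hW2,
      show PySem.Chars.join [' '] W1 ++ [' '] ++ PySem.Chars.join [' '] W2
        = PySem.Chars.join [' '] W1 ++ ' ' :: PySem.Chars.join [' '] W2 by simp,
      pv_strip_mid W1 W2 hg1 hg2, List.map_append, ← hW1, ← hW2]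

-- ---- B side: the state machine ----

-- direct form of the capped word
def pvCapw : List Char → List Char
  | [] => []
  | c :: r => PySem.Chars.upperChar c :: PySem.Chars.lower r

theorem pv_capWord_eq (w : List Char) : pvCapWord w = pvCapw w := by
  cases w with
  | nil => rfl
  | cons c r =>
    have hget : PySem.List.pyGet? (c :: r) (0 : Int) = some c := by
      simp [PySem.List.pyGet?, PySem.List.pyIdx?]
    have hslice : PySem.List.slice (c :: r) (some 1) none = r := by
      rw [PySem.List.slice_from _ (by norm_num)]; simp
    unfold pvCapWord
    rw [hget, hslice]
    simp [PySem.Chars.upper, pvCapw]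

theorem pv_capw_ne (w : List Char) (h : w ≠ []) : pvCapw w ≠ [] := by
  obtain ⟨c, r, rfl⟩ := List.exists_cons_of_ne_nil h
  simp [pvCapw]

theorem pv_capw_snoc (w : List Char) (c : Char) (h : w ≠ []) :
    pvCapw (w ++ [c]) = pvCapw w ++ [PySem.Chars.lowerChar c] := by
  obtain ⟨d, r, rfl⟩ := List.exists_cons_of_ne_nil h
  simp [pvCapw, PySem.Chars.lower]

def pvJoinCaps (W : List (List Char)) : List Char :=
  PySem.Chars.join [' '] (W.map pvCapw)

theorem pv_joinCaps_snoc (A : List (List Char)) (w : List Char) (hA : A ≠ []) :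
    pvJoinCaps (A ++ [w]) = pvJoinCaps A ++ ' ' :: pvCapw w := by
  unfold pvJoinCaps
  rw [List.map_append]
  simp only [List.map]
  rw [pv_join_append (A.map pvCapw) [pvCapw w] (by simpa using hA) (by simp),
    PySem.Chars.join_singleton]

theorem pv_joinCaps_ne (A : List (List Char)) (hA : ∀ w ∈ A, w ≠ []) (hne : A ≠ []) :
    pvJoinCaps A ≠ [] := by
  obtain ⟨w, A', rfl⟩ := List.exists_cons_of_ne_nil hne
  unfold pvJoinCaps
  cases A' with
  | nil =>
    simp only [List.map]
    rw [PySem.Chars.join_singleton]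
    exact pv_capw_ne w (hA w (by simp))
  | cons v A'' =>
    simp only [List.map]
    rw [PySem.Chars.join_cons_cons]
    obtain ⟨c, r, hw⟩ := List.exists_cons_of_ne_nil (pv_capw_ne w (hA w (by simp)))
    simp [hw]

-- the B machine's output rendered from split₀.go's state
def pvRender (acc : List (List Char)) (cur : List Char) : List Char :=
  pvJoinCaps acc.reverse ++
    (if cur = [] then []
     else (if acc = [] then [] else [' ']) ++ pvCapw cur.reverse)

theorem pv_joinCaps_nil : pvJoinCaps [] = [] := rfl

theorem pv_render_nil (acc : List (List Char)) : pvRender acc [] = pvJoinCaps acc.reverse := by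
  simp [pvRender]

theorem pv_render_push (acc : List (List Char)) (cur : List Char) (hcur : cur ≠ []) :
    pvRender acc cur = pvJoinCaps (acc.reverse ++ [cur.reverse]) := by
  by_cases hacc : acc = []
  · subst hacc
    unfold pvRender pvJoinCaps
    simp only [List.reverse_nil, List.nil_append, List.map, if_neg hcur]
    rw [PySem.Chars.join_singleton]
    rfl
  · rw [pv_joinCaps_snoc acc.reverse cur.reverse (by simpa using hacc)]
    unfold pvRender
    rw [if_neg hcur, if_neg hacc]
    simp

theorem pv_runB_go (s : List Char) :
    ∀ (cur : List Char) (acc : List (List Char)), (∀ w ∈ acc, w ≠ []) →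
      pvRunB s (pvRender acc cur) cur.isEmpty
        = pvJoinCaps (PySem.Chars.split₀.go s cur acc) := by
  induction s with
  | nil =>
    intro cur acc hacc
    by_cases hcur : cur = []
    · subst hcur
      simp only [PySem.Chars.split₀.go, List.isEmpty_nil, if_true]
      simp [pvRunB, pvRender]
    · simp only [PySem.Chars.split₀.go, List.isEmpty_iff, if_neg hcur]
      rw [List.isEmpty_eq_false_iff.mpr hcur]
      show pvRender acc cur = pvJoinCaps (cur.reverse :: acc).reverse
      rw [pv_render_push acc cur hcur]
      simp
  | cons c s ih =>
    intro cur acc hacc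
    by_cases hc : PySem.Chars.isspace c = true
    · -- whitespace: the machine resets the flag, go finishes the current word
      have hL : pvRunB (c :: s) (pvRender acc cur) cur.isEmpty
          = pvRunB s (pvRender acc cur) true := by
        cases cur.isEmpty <;> simp [pvRunB, hc]
      rw [hL]
      by_cases hcur : cur = []
      · subst hcur
        simp only [PySem.Chars.split₀.go, hc, if_true, List.isEmpty_nil]
        have := ih [] acc hacc
        simpa using this
      · simp only [PySem.Chars.split₀.go, hc, if_true, List.isEmpty_iff, if_neg hcur]
        have hacc' : ∀ w ∈ (cur.reverse :: acc), w ≠ [] := by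
          intro w hw
          rcases List.mem_cons.mp hw with hw | hw
          · subst hw; simpa using hcur
          · exact hacc w hw
        have h := ih [] (cur.reverse :: acc) hacc'
        rw [pv_render_nil] at h
        rw [pv_render_push acc cur hcur]
        simpa using h
    · -- non-whitespace: the machine emits a (cased) character, go extends the word
      simp only [PySem.Chars.split₀.go, hc, Bool.false_eq_true, if_false]
      by_cases hcur : cur = []
      · -- start of a new word
        subst hcur
        have hstep : pvRunB (c :: s) (pvRender acc []) true
            = pvRunB s ((if (pvRender acc []).isEmpty then pvRender acc []
                else pvRender acc [] ++ [' ']) ++ PySem.Chars.upper [c]) false := by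
          simp [pvRunB, hc]
        have hren : ((if (pvRender acc []).isEmpty then pvRender acc []
              else pvRender acc [] ++ [' ']) ++ PySem.Chars.upper [c]) = pvRender acc [c] := by
          rw [pv_render_nil]
          by_cases hacc0 : acc = []
          · subst hacc0
            simp [pvJoinCaps, pvRender, PySem.Chars.upper, pvCapw, PySem.Chars.lower]
          · have hne : pvJoinCaps acc.reverse ≠ [] :=
              pv_joinCaps_ne acc.reverse (by simpa using hacc) (by simpa using hacc0)
            rw [if_neg (by simpa [List.isEmpty_iff] using hne)]
            unfold pvRender
            rw [if_neg (by simp : ([c] : List Char) ≠ []), if_neg hacc0]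
            simp [PySem.Chars.upper, pvCapw, PySem.Chars.lower]
        have h := ih [c] acc hacc
        simp only [List.isEmpty_nil] at *
        rw [hstep, hren]
        simpa using h
      · -- inside a word
        have hstep : pvRunB (c :: s) (pvRender acc cur) cur.isEmpty
            = pvRunB s (pvRender acc cur ++ PySem.Chars.lower [c]) false := by
          rw [List.isEmpty_eq_false_iff.mpr hcur]
          simp [pvRunB, hc]
        have hren : pvRender acc cur ++ PySem.Chars.lower [c] = pvRender acc (c :: cur) := by
          unfold pvRender
          rw [if_neg hcur, if_neg (by simp : (c :: cur) ≠ [])]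
          rw [show (c :: cur).reverse = cur.reverse ++ [c] by simp,
            pv_capw_snoc cur.reverse c (by simpa using hcur)]
          simp [PySem.Chars.lower]
        have h := ih (c :: cur) acc hacc
        rw [List.isEmpty_eq_false_iff.mpr (by simp : (c :: cur) ≠ [])] at h
        rw [hstep, hren]
        exact h

theorem pv_runB_eq (s : List Char) :
    pvRunB s [] true = pvJoinCaps (PySem.Chars.split₀ s) := by
  have h := pv_runB_go s [] [] (by simp)
  rw [pv_render_nil] at h
  simpa [pv_joinCaps_nil] using h

-- split₀.go accumulates independently of acc
theorem pv_go_acc (s : List Char) :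
    ∀ cur acc, PySem.Chars.split₀.go s cur acc
      = acc.reverse ++ PySem.Chars.split₀.go s cur [] := by
  induction s with
  | nil =>
    intro cur acc
    by_cases hc : cur = [] <;> simp [PySem.Chars.split₀.go, hc, List.isEmpty_iff]
  | cons c s ih =>
    intro cur acc
    by_cases hc : PySem.Chars.isspace c = true
    · by_cases hcur : cur = []
      · subst hcur
        simp only [PySem.Chars.split₀.go, hc, List.isEmpty_nil, if_true]
        exact ih [] acc
      · simp only [PySem.Chars.split₀.go, hc, if_true, List.isEmpty_iff, if_neg hcur]
        rw [ih [] (cur.reverse :: acc), ih [] [cur.reverse]]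
        simp
    · simp only [PySem.Chars.split₀.go, hc, Bool.false_eq_true, if_false]
      exact ih (c :: cur) acc

-- splitting at an inserted space concatenates the word lists
theorem pv_go_mid (x : List Char) :
    ∀ (cur : List Char) (acc : List (List Char)) (y : List Char),
      PySem.Chars.split₀.go (x ++ ' ' :: y) cur acc
        = PySem.Chars.split₀.go y [] ((PySem.Chars.split₀.go x cur acc).reverse) := by
  induction x with
  | nil =>
    intro cur acc y
    have hsp : PySem.Chars.isspace ' ' = true := by decide
    by_cases hc : cur = [] <;>
      simp [PySem.Chars.split₀.go, hsp, hc, List.isEmpty_iff]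
  | cons c x ih =>
    intro cur acc y
    by_cases hc : PySem.Chars.isspace c = true
    · by_cases hcur : cur = []
      · subst hcur
        simp only [List.cons_append, PySem.Chars.split₀.go, hc, if_true, List.isEmpty_nil]
        exact ih [] acc y
      · simp only [List.cons_append, PySem.Chars.split₀.go, hc, if_true,
          List.isEmpty_iff, if_neg hcur]
        exact ih [] _ y
    · simp only [List.cons_append, PySem.Chars.split₀.go, hc, Bool.false_eq_true, if_false]
      exact ih (c :: cur) acc y

theorem pv_split₀_mid (x y : List Char) :
    PySem.Chars.split₀ (x ++ ' ' :: y)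
      = PySem.Chars.split₀ x ++ PySem.Chars.split₀ y := by
  unfold PySem.Chars.split₀
  rw [pv_go_mid x [] [] y, pv_go_acc y [] ((PySem.Chars.split₀.go x [] []).reverse)]
  simp

-- ===== VERDICT (by name: the statement is the Claim_ definition above) =====
theorem format_customer_name_spec : Claim_equal_format_customer_name := by
  intro f l _
  unfold Spec_format_customer_name format_customer_name_alt
  rw [pv_A_char f l,
    show f.toList ++ [' '] ++ l.toList = f.toList ++ ' ' :: l.toList by
      rw [List.append_assoc]; rfl,
    pv_runB_eq, pv_split₀_mid]
  unfold pvJoinCaps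
  rw [List.map_congr_left (fun w _ => pv_capWord_eq w)]
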